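-- pv_equiv track=rewrite | github.com/raghu1199/DS-ALGO-COMPTETIVE_CODING- | COMPETETIVE_CODES/DSASHEET/purearr2.py | goodValBadval
-- ===== SOURCE A (Python) =====
-- def goodValBadval(arr,k):
--     n=len(arr)
--     size=0
--     for ele in arr:
--         if ele<=k:
--             size+=1
--     badvalues=0
--     for i in range(0,size):
--         if arr[i]>k:
--             badvalues+=1
--
--     res=badvalues
--     for i in range(1,n-size+1):
--         last=arr[i-1]
--         new=arr[i+size-1]
--         if last > k:
--             badvalues-=1
--         if new >k:
--             badvalues+=1
--         res=min(res,badvalues)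
--
--     return res
-- ===== SOURCE B (Python) =====
-- def goodValBadval(arr, k):
--     n = len(arr)
--     size = sum(1 for x in arr if x <= k)
--     pre = [0]
--     for x in arr:
--         pre.append(pre[-1] + (1 if x > k else 0))
--     return min(pre[i + size] - pre[i] for i in range(n - size + 1))
-- ===== Notes on version B (the rewrite author's own statement) =====
-- stated objective: alternative
-- what changed: Replaced A's incremental sliding-window update (subtract the leaving element, add the entering one) with a precomputed prefix-sum table of '>k' counts and a single min over the per-window differences pre[i+size]-pre[i].
import Mathlib
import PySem

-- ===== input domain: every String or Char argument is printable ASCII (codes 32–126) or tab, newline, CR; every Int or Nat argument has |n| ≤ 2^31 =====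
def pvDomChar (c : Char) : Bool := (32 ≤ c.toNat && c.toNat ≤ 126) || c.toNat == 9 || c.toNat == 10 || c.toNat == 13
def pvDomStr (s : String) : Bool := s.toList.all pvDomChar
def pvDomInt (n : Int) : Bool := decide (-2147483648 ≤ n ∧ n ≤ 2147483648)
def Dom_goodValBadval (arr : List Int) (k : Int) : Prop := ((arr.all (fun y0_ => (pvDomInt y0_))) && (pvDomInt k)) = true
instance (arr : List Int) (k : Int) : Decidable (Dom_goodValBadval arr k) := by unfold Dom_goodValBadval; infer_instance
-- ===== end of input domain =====

-- B replaces A's incremental sliding-window update with a precomputed prefix-sum table of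
-- "> k" counts and a single min over all window differences (objective: alternative).

-- ===== PORT A =====
def goodValBadval (arr : List Int) (k : Int) : Int :=
  let n : Int := arr.length
  let size : Int := arr.foldl (fun s ele => if ele ≤ k then s + 1 else s) 0
  let badvalues : Int := (PySem.List.pyRange 0 size 1).foldl
      (fun b i => if PySem.List.pyGetD arr i 0 > k then b + 1 else b) 0
  let st := (PySem.List.pyRange 1 (n - size + 1) 1).foldl
      (fun (st : Int × Int) i =>
        let last := PySem.List.pyGetD arr (i - 1) 0
        let nw := PySem.List.pyGetD arr (i + size - 1) 0
        let bv1 := if last > k then st.2 - 1 else st.2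
        let bv2 := if nw > k then bv1 + 1 else bv1
        (min st.1 bv2, bv2)) (badvalues, badvalues)
  st.1

-- ===== PORT B =====
def goodValBadval_alt (arr : List Int) (k : Int) : Int :=
  let n : Int := arr.length
  let size : Int := ((arr.filter (fun x => x ≤ k)).length : Int)
  let pre : List Int := arr.foldl
      (fun p x => p ++ [PySem.List.pyGetD p (-1) 0 + (if x > k then 1 else 0)]) [0]
  let vals := (PySem.List.pyRange 0 (n - size + 1) 1).map
      (fun i => PySem.List.pyGetD pre (i + size) 0 - PySem.List.pyGetD pre i 0)
  (PySem.List.min? vals (fun y => y)).getD 0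

-- ===== PRECONDITION & SPEC =====
def Spec_goodValBadval (arr : List Int) (k : Int) (out : Int) : Prop := out = goodValBadval_alt arr k
instance (arr : List Int) (k : Int) (out : Int) : Decidable (Spec_goodValBadval arr k out) := by unfold Spec_goodValBadval; infer_instance

-- ===== CLAIM (what is proved, stated in full; the proofs are below) =====
def Claim_equal_goodValBadval : Prop := ∀ (arr : List Int) (k : Int), Dom_goodValBadval arr k → Spec_goodValBadval arr k (goodValBadval arr k)

-- ===== LEMMAS AND PROOFS =====

-- number of elements > k among the first j elements of arr
def pvCnt (arr : List Int) (k : Int) (j : Nat) : Int :=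
  (((arr.take j).countP (fun x => decide (k < x)) : Nat) : Int)

-- badness of the window of length sz starting at j
def pvD (arr : List Int) (k : Int) (sz j : Nat) : Int :=
  pvCnt arr k (j + sz) - pvCnt arr k j

theorem pvCnt_succ (arr : List Int) (k : Int) (m : Nat) (hm : m < arr.length) :
    pvCnt arr k (m + 1) = pvCnt arr k m + (if arr.getD m 0 > k then 1 else 0) := by
  unfold pvCnt
  rw [List.take_add_one, List.countP_append]
  simp [List.getD_eq_getElem?_getD, List.getElem?_eq_getElem hm, List.countP_cons]

theorem pvSizeFold (arr : List Int) (k : Int) (c : Int) :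
    arr.foldl (fun s ele => if ele ≤ k then s + 1 else s) c
      = c + ((arr.countP (fun x => decide (x ≤ k)) : Nat) : Int) := by
  induction arr generalizing c with
  | nil => simp
  | cons x xs ih =>
    simp only [List.foldl_cons, List.countP_cons, ih]
    split_ifs <;> simp_all <;> omega

theorem pvBadFold (arr : List Int) (k : Int) (m : Nat) (hm : m ≤ arr.length) (c : Int) :
    (PySem.List.pyRange 0 (m : Int) 1).foldl
      (fun b i => if PySem.List.pyGetD arr i 0 > k then b + 1 else b) c
      = c + pvCnt arr k m := by
  induction m with
  | zero => simp [pvCnt]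
  | succ m ih =>
    rw [show ((m+1 : Nat) : Int) = (m : Int) + 1 by push_cast; ring,
        PySem.List.pyRange_one_succ_right (by omega), List.foldl_append,
        ih (by omega)]
    have hm' : m < arr.length := by omega
    simp only [List.foldl_cons, List.foldl_nil, PySem.List.pyGetD_natCast,
      pvCnt_succ arr k m hm']
    split_ifs <;> ring

theorem pvPreFold (arr : List Int) (k : Int) :
    arr.foldl (fun p x => p ++ [PySem.List.pyGetD p (-1) 0 + (if x > k then 1 else 0)]) [0]
      = (List.range (arr.length + 1)).map (fun j => pvCnt arr k j) := by
  induction arr using List.reverseRecOn with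
  | nil => simp [pvCnt]
  | append_singleton xs x ih =>
    rw [List.foldl_append, ih]
    simp only [List.foldl_cons, List.foldl_nil]
    rw [PySem.List.pyGetD_neg_one _ 0 (by simp)]
    have hlast : ((List.range (xs.length + 1)).map (fun j => pvCnt xs k j)).getLast (by simp)
        = pvCnt xs k xs.length := by
      rw [List.getLast_eq_getElem]; simp
    rw [hlast, show (xs ++ [x]).length + 1 = (xs.length + 1) + 1 by simp]
    conv_rhs => rw [List.range_succ, List.map_append]
    congr 1
    · apply List.map_congr_left
      intro j hj
      simp only [List.mem_range] at hj
      unfold pvCnt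
      rw [List.take_append_of_le_length (by omega)]
    · simp only [List.map_cons, List.map_nil]
      congr 1
      unfold pvCnt
      have h2 : (xs ++ [x]).take (xs.length + 1) = xs ++ [x] := by
        apply List.take_of_length_le; simp
      rw [h2, List.countP_append, List.take_length]
      simp [List.countP_cons]

theorem pvPreGet (arr : List Int) (k : Int) (m : Nat) (hm : m ≤ arr.length) :
    ((List.range (arr.length + 1)).map (fun j => pvCnt arr k j)).getD m 0 = pvCnt arr k m := by
  rw [List.getD_eq_getElem?_getD]
  simp [Nat.lt_succ_of_le hm]

theorem pvMainFold (arr : List Int) (k : Int) (sz : Nat) (hsz : sz ≤ arr.length)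
    (j : Nat) (hj : j ≤ arr.length - sz) (res : Int) :
    (PySem.List.pyRange 1 ((j : Int) + 1) 1).foldl
      (fun (st : Int × Int) i =>
        let last := PySem.List.pyGetD arr (i - 1) 0
        let nw := PySem.List.pyGetD arr (i + (sz : Int) - 1) 0
        let bv1 := if last > k then st.2 - 1 else st.2
        let bv2 := if nw > k then bv1 + 1 else bv1
        (min st.1 bv2, bv2)) (res, pvD arr k sz 0)
      = (((List.range j).map (fun t => pvD arr k sz (t + 1))).foldl min res, pvD arr k sz j) := by
  induction j with
  | zero => simp [PySem.List.pyRange_one_eq_nil]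
  | succ j ih =>
    have hjn : j < arr.length := by omega
    have hjs : j + sz < arr.length := by omega
    rw [show ((((j + 1 : Nat)) : Int) + 1) = ((j : Int) + 1) + 1 by push_cast; ring,
        PySem.List.pyRange_one_succ_right (by omega), List.foldl_append, ih (by omega)]
    simp only [List.foldl_cons, List.foldl_nil]
    have e1 : (j : Int) + 1 - 1 = ((j : Nat) : Int) := by ring
    have e2 : (j : Int) + 1 + (sz : Int) - 1 = (((j + sz : Nat)) : Int) := by push_cast; ring
    rw [e1, e2, PySem.List.pyGetD_natCast, PySem.List.pyGetD_natCast]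
    have hd : (if arr.getD (j + sz) 0 > k then
            (if arr.getD j 0 > k then pvD arr k sz j - 1 else pvD arr k sz j) + 1
          else (if arr.getD j 0 > k then pvD arr k sz j - 1 else pvD arr k sz j))
        = pvD arr k sz (j + 1) := by
      unfold pvD
      rw [show j + 1 + sz = (j + sz) + 1 by ring, pvCnt_succ arr k (j+sz) hjs,
          pvCnt_succ arr k j hjn]
      split_ifs <;> ring
    rw [hd, List.range_succ, List.map_append, List.foldl_append]
    simp

-- ===== VERDICT (by name: the statement is the Claim_ definition above) =====
theorem goodValBadval_spec : Claim_equal_goodValBadval := by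
  intro arr k _
  unfold Spec_goodValBadval goodValBadval goodValBadval_alt
  dsimp only
  have hsz : arr.countP (fun x => decide (x ≤ k)) ≤ arr.length := List.countP_le_length
  set sz := arr.countP (fun x => decide (x ≤ k)) with hszdef
  -- the two size computations
  have hA1 : arr.foldl (fun s ele => if ele ≤ k then s + 1 else s) 0 = (sz : Int) := by
    simpa using pvSizeFold arr k 0
  have hB1 : (((arr.filter (fun x => x ≤ k)).length : Nat) : Int) = (sz : Int) := by
    rw [hszdef, List.countP_eq_length_filter]
  rw [hA1, hB1, pvPreFold arr k]
  -- A's initial badvalues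
  have hbad : (PySem.List.pyRange 0 (sz : Int) 1).foldl
      (fun b i => if PySem.List.pyGetD arr i 0 > k then b + 1 else b) 0 = pvCnt arr k sz := by
    simpa using pvBadFold arr k sz hsz 0
  rw [hbad]
  -- common loop bound
  have hb : (arr.length : Int) - (sz : Int) + 1 = ((arr.length - sz : Nat) : Int) + 1 := by omega
  rw [hb]
  have hd0 : pvCnt arr k sz = pvD arr k sz 0 := by simp [pvD, pvCnt]
  -- A's sliding loop
  rw [hd0, pvMainFold arr k sz hsz (arr.length - sz) le_rfl (pvD arr k sz 0)]
  -- B's window values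
  have hvals : ((PySem.List.pyRange 0 (((arr.length - sz : Nat) : Int) + 1) 1).map
      (fun i => PySem.List.pyGetD ((List.range (arr.length + 1)).map (fun j => pvCnt arr k j)) (i + (sz : Int)) 0
        - PySem.List.pyGetD ((List.range (arr.length + 1)).map (fun j => pvCnt arr k j)) i 0))
      = (List.range (arr.length - sz + 1)).map (fun t => pvD arr k sz t) := by
    rw [show ((arr.length - sz : Nat) : Int) + 1 = ((arr.length - sz + 1 : Nat) : Int) by push_cast; ring,
        PySem.List.pyRange_zero_nat, List.map_map]
    apply List.map_congr_left
    intro t ht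
    simp only [List.mem_range] at ht
    simp only [Function.comp]
    rw [show (t : Int) + (sz : Int) = ((t + sz : Nat) : Int) by push_cast; ring,
        PySem.List.pyGetD_natCast, PySem.List.pyGetD_natCast,
        pvPreGet arr k (t + sz) (by omega), pvPreGet arr k t (by omega)]
    rfl
  rw [hvals, List.range_succ_eq_map, List.map_cons, List.map_map,
      PySem.List.min?_id_cons, Option.getD_some]
  rfl
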